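-- pv_equiv track=rewrite | github.com/rabruni/Brain_Factory | portal.py | classify_events
-- ===== SOURCE A (Python) =====
-- NOISE_EVENTS = {"agent_liveness_observed"}
--
-- def classify_events(events):
--     """Split events into significant and noise (heartbeat spam)."""
--     significant = []
--     noise = []
--     for ev in events:
--         if ev.get("event_type") in NOISE_EVENTS:
--             noise.append(ev)
--         else:
--             significant.append(ev)
--     return significant, noise
-- ===== SOURCE B (Python) =====
-- NOISE_EVENTS = {"agent_liveness_observed"}
--
-- def classify_events(events):
--     """Split events into significant and noise (heartbeat spam)."""
--     # Stable sort by the boolean noise key moves all significant events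
--     # (key False) in front of all noise events (key True), preserving the
--     # relative order inside each group; then split at the significant count.
--     order = sorted(events, key=lambda ev: ev.get("event_type") in NOISE_EVENTS)
--     k = len(events) - sum(ev.get("event_type") in NOISE_EVENTS for ev in events)
--     return order[:k], order[k:]
-- ===== Notes on version B (the rewrite author's own statement) =====
-- stated objective: alternative
-- what changed: Replaced the single accumulating two-list loop with a stable sort on the boolean noise key followed by a split of the sorted list at the count of significant events; stability guarantees both groups keep their original relative order.
import Mathlib
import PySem

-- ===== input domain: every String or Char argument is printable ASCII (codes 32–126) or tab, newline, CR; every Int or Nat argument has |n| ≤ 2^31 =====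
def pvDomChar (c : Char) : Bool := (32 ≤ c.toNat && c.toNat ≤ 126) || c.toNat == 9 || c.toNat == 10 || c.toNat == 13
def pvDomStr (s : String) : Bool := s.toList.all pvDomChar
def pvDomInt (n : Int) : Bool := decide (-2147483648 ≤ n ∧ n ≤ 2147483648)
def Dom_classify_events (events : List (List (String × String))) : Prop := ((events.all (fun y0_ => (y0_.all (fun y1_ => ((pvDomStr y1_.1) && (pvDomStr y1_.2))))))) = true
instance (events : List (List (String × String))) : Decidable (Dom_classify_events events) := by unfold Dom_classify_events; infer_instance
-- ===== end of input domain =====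

-- B replaces A's single accumulating loop with a stable sort by the boolean noise key
-- followed by a split at the count of significant events (alternative algorithm).

-- ev.get("event_type") in NOISE_EVENTS, shared dict-lookup predicate (exact: first-match lookup)
def pvIsNoise (ev : List (String × String)) : Bool :=
  (PySem.Dict.mk ev).get? "event_type" == some "agent_liveness_observed"

-- ===== PORT A =====
def classify_events (events : List (List (String × String))) : (List (List (String × String))) × (List (List (String × String))) :=
  events.foldl (fun acc ev =>
    if pvIsNoise ev then (acc.1, acc.2 ++ [ev]) else (acc.1 ++ [ev], acc.2)) ([], [])

-- ===== PORT B =====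
-- Python bool sort key ported as its int value 0/1 (Python bools compare as ints)
def pvNoiseKey (ev : List (String × String)) : Int := if pvIsNoise ev then 1 else 0

def classify_events_alt (events : List (List (String × String))) : (List (List (String × String))) × (List (List (String × String))) :=
  let order := PySem.List.sorted events pvNoiseKey
  let k : Int := (events.length : Int) -
    events.foldl (fun s ev => s + (if pvIsNoise ev then 1 else 0)) 0
  (PySem.List.slice order none (some k), PySem.List.slice order (some k) none)

-- ===== PRECONDITION & SPEC =====
def Spec_classify_events (events : List (List (String × String))) (out : (List (List (String × String))) × (List (List (String × String)))) : Prop := out = classify_events_alt events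
instance (events : List (List (String × String))) (out : (List (List (String × String))) × (List (List (String × String)))) : Decidable (Spec_classify_events events out) := by unfold Spec_classify_events; infer_instance

-- ===== CLAIM (what is proved, stated in full; the proofs are below) =====
def Claim_equal_classify_events : Prop := ∀ (events : List (List (String × String))), Dom_classify_events events → Spec_classify_events events (classify_events events)

-- ===== LEMMAS AND PROOFS =====

-- A's loop produces (prefix significant, prefix noise) appended to the accumulators.
theorem classify_events_foldl (events : List (List (String × String)))
    (sig noise : List (List (String × String))) :
    events.foldl (fun acc ev =>
      if pvIsNoise ev then (acc.1, acc.2 ++ [ev]) else (acc.1 ++ [ev], acc.2)) (sig, noise)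
      = (sig ++ events.filter (fun ev => !pvIsNoise ev),
         noise ++ events.filter (fun ev => pvIsNoise ev)) := by
  induction events generalizing sig noise with
  | nil => simp
  | cons ev rest ih =>
    simp only [List.foldl_cons, List.filter_cons]
    by_cases h : pvIsNoise ev = true
    · simp [h, ih]
    · simp [h, ih]

-- Inserting into a (significant ++ noise) partitioned list keeps the partition shape.
theorem insertBy_partition (x : List (String × String))
    (s n : List (List (String × String)))
    (hs : ∀ y ∈ s, pvIsNoise y = false) (hn : ∀ y ∈ n, pvIsNoise y = true) :
    PySem.List.insertBy (fun a b => decide (pvNoiseKey a < pvNoiseKey b)) x (s ++ n)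
      = if pvIsNoise x then s ++ n ++ [x] else s ++ [x] ++ n := by
  by_cases hx : pvIsNoise x = true
  · rw [PySem.List.insertBy_of_forall_not_before]
    · simp [hx]
    · intro y _
      simp [pvNoiseKey, hx]
      split_ifs <;> omega
  · simp only [hx]
    induction s with
    | nil =>
      cases n with
      | nil => simp [PySem.List.insertBy]
      | cons m t =>
        have hm : pvIsNoise m = true := hn m (by simp)
        simp [PySem.List.insertBy, pvNoiseKey, hx, hm]
    | cons a s' ih =>
      have ha : pvIsNoise a = false := hs a (by simp)
      have := ih (fun y hy => hs y (by simp [hy]))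
      simp [PySem.List.insertBy, pvNoiseKey, ha, hx] at this ⊢
      exact this

-- The insertion-sort fold over events extends a partitioned accumulator to the partition of all events.
theorem sorted_fold_partition (events : List (List (String × String)))
    (s n : List (List (String × String)))
    (hs : ∀ y ∈ s, pvIsNoise y = false) (hn : ∀ y ∈ n, pvIsNoise y = true) :
    events.foldl (fun acc x =>
      PySem.List.insertBy (fun a b => decide (pvNoiseKey a < pvNoiseKey b)) x acc) (s ++ n)
      = s ++ events.filter (fun ev => !pvIsNoise ev) ++ n ++ events.filter (fun ev => pvIsNoise ev) := by
  induction events generalizing s n with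
  | nil => simp
  | cons ev rest ih =>
    simp only [List.foldl_cons, List.filter_cons]
    rw [insertBy_partition ev s n hs hn]
    by_cases h : pvIsNoise ev = true
    · have : s ++ n ++ [ev] = s ++ (n ++ [ev]) := by simp
      rw [if_pos h, this, ih s (n ++ [ev]) hs (by
        intro y hy
        rcases List.mem_append.mp hy with hy | hy
        · exact hn y hy
        · simp at hy; simpa [hy] using h)]
      simp [h]
    · have : s ++ [ev] ++ n = (s ++ [ev]) ++ n := by simp
      rw [if_neg h, this, ih (s ++ [ev]) n (by
        intro y hy
        rcases List.mem_append.mp hy with hy | hy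
        · exact hs y hy
        · simp at hy; simp [hy]; exact Bool.not_eq_true _ |>.mp h) hn]
      simp [h]

-- The stable sort by the noise key is exactly the partition.
theorem sorted_eq_partition (events : List (List (String × String))) :
    PySem.List.sorted events pvNoiseKey
      = events.filter (fun ev => !pvIsNoise ev) ++ events.filter (fun ev => pvIsNoise ev) := by
  rw [PySem.List.sorted_eq_foldl_insertBy]
  simpa using sorted_fold_partition events [] [] (by simp) (by simp)

-- The counting fold equals the noise count.
theorem count_fold_eq (events : List (List (String × String))) (init : Int) :
    events.foldl (fun s ev => s + (if pvIsNoise ev then 1 else 0)) init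
      = init + (events.countP pvIsNoise : Int) := by
  induction events generalizing init with
  | nil => simp
  | cons ev rest ih =>
    simp only [List.foldl_cons, List.countP_cons, ih]
    by_cases h : pvIsNoise ev = true <;> simp [h] <;> ring

-- length of the two filters sums to the whole list's length
theorem filter_length_split (events : List (List (String × String))) :
    (events.filter (fun ev => !pvIsNoise ev)).length
      + (events.filter pvIsNoise).length = events.length := by
  induction events with
  | nil => simp
  | cons ev rest ih =>
    simp only [List.filter_cons]
    by_cases h : pvIsNoise ev = true <;> simp [h] <;> omega

-- ===== VERDICT (by name: the statement is the Claim_ definition above) =====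
theorem classify_events_spec : Claim_equal_classify_events := by
  intro events _
  show classify_events events = classify_events_alt events
  have hlen : (events.filter (fun ev => !pvIsNoise ev)).length
      = events.length - events.countP pvIsNoise := by
    have hA : events.countP pvIsNoise = (events.filter pvIsNoise).length :=
      List.countP_eq_length_filter
    have hB := filter_length_split events
    omega
  have hkn : (events.length : Int) -
      events.foldl (fun s ev => s + (if pvIsNoise ev then 1 else 0)) 0
      = ((events.length - events.countP pvIsNoise : Nat) : Int) := by
    rw [count_fold_eq]
    have : events.countP pvIsNoise ≤ events.length := List.countP_le_length
    push_cast [Nat.cast_sub this]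
    ring
  rw [classify_events, classify_events_alt, classify_events_foldl, sorted_eq_partition]
  simp only [hkn, List.nil_append]
  rw [PySem.List.slice_to_natCast, PySem.List.slice_from_natCast]
  have htake : (events.filter (fun ev => !pvIsNoise ev) ++ events.filter (fun ev => pvIsNoise ev)).take
      (events.length - events.countP pvIsNoise)
      = events.filter (fun ev => !pvIsNoise ev) := by
    rw [← hlen, List.take_left]
  have hdrop : (events.filter (fun ev => !pvIsNoise ev) ++ events.filter (fun ev => pvIsNoise ev)).drop
      (events.length - events.countP pvIsNoise)
      = events.filter (fun ev => pvIsNoise ev) := by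
    rw [← hlen, List.drop_left]
  rw [htake, hdrop]
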